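-- pv_equiv track=rewrite | github.com/LB365/streamlit-meets-saturn | viz/graphs/balances/dep_graph.py | find_dep_graph
-- ===== SOURCE A (Python) =====
-- def find_parents(x, input_data):
--     res = []
--     new = input_data[x]
--     while new != []:
--         res.extend([i for i in new if i not in res])
--         temp = []
--         for i in res:
--             if input_data.get(i):
--                 temp.extend(input_data.get(i))
--         new = [k for k in temp if k not in res]
--     return res
--
-- def find_dep_graph(dependency_graph):
--     output_parents = {i: find_parents(i, dependency_graph)
--                       for i in dependency_graph}
--     output_children = {k: [] for k in dependency_graph.keys()}
--     for x in dependency_graph: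
--         for child, parents in output_parents.items():
--             for parent in parents:
--                 if x == parent:
--                     output_children[x].append(child)
--     return dict(filter(lambda v: v[1], output_children.items()))
-- ===== SOURCE B (Python) =====
-- def find_dep_graph(dependency_graph):
--     # Level-order expansion keeping only the current frontier (A rescans all of
--     # res every round); a seen set replaces A's repeated list-membership scans.
--     def ancestors(node):
--         res = []
--         seen = set()
--         frontier = dependency_graph[node]
--         while frontier:
--             res.extend(frontier)
--             seen.update(frontier)
--             frontier = [t for v in frontier
--                         for t in dependency_graph.get(v, [])
--                         if t not in seen]
--         return res
--
--     # Single-pass inversion of the ancestor lists into the children map.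
--     children = {k: [] for k in dependency_graph}
--     for node in dependency_graph:
--         for p in ancestors(node):
--             if p in children:
--                 children[p].append(node)
--     return {k: v for k, v in children.items() if v}
-- ===== Notes on version B (the rewrite author's own statement) =====
-- stated objective: faster
-- what changed: B computes each node's transitive ancestor list by expanding only the current BFS frontier against a seen set (A rescans the whole accumulated list every round with list-membership tests), and inverts the ancestor lists into the children map in a single pass instead of A's triple-nested scan over keys x children x parents.
import Mathlib
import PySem

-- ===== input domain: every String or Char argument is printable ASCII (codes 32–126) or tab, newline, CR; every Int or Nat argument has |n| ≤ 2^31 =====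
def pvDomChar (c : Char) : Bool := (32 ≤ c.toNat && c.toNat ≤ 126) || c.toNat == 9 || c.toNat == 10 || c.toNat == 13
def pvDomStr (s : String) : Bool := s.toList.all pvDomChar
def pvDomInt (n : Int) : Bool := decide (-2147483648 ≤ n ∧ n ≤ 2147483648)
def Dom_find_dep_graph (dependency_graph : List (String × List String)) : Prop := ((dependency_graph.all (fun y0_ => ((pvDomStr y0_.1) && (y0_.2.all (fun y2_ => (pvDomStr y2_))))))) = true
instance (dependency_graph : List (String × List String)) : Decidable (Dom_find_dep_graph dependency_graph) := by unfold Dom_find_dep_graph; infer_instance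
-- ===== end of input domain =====

-- B replaces A's per-level rescan of all discovered ancestors by a frontier-only
-- level expansion with a seen set, and A's triple-nested children inversion by a
-- single pass over each node's ancestor list (objective: faster).

-- ===== PORT A =====
-- while loop of find_parents; fuel only makes the recursion structural (each
-- productive round strictly grows res, bounded by the total size of the values)
def findParentsLoop (d : PySem.Dict String (List String)) :
    List String → List String → Nat → List String
  | res, _, 0 => res
  | res, news, Nat.succ fuel =>
    if news = [] then res else
      let res' := res ++ news.filter (fun i => !(res.contains i))
      let temp := res'.foldl (fun t i =>
        match d.get? i with
        | some l => if l.isEmpty then t else t ++ l   -- `if input_data.get(i):` truthiness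
        | none => t) []
      findParentsLoop d res' (temp.filter (fun k => !(res'.contains k))) fuel

-- find_parents is only ever called with x a key of d, so input_data[x] cannot raise
def find_parents (x : String) (d : PySem.Dict String (List String)) : List String :=
  findParentsLoop d [] ((d.get? x).getD []) ((d.items.flatMap (fun p => p.2)).length + 1)

def find_dep_graph (dependency_graph : List (String × List String)) : List (String × List String) :=
  let d : PySem.Dict String (List String) := ⟨dependency_graph⟩
  let keys := d.keys
  let output_parents := keys.foldl (fun op i => op.insert i (find_parents i d)) PySem.Dict.empty
  let output_children : PySem.Dict String (List String) :=
    keys.foldl (fun oc k => oc.insert k []) PySem.Dict.empty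
  -- output_children[x].append(child): x is always a present key, modify appends
  let oc := keys.foldl (fun oc x =>
    output_parents.items.foldl (fun oc cp =>
      cp.2.foldl (fun oc parent =>
        if x == parent then oc.modify x [] (fun v => v ++ [cp.1]) else oc) oc) oc) output_children
  (PySem.Dict.ofList (oc.items.filter (fun p => !p.2.isEmpty))).items

-- ===== PORT B =====
-- frontier-only level expansion with a seen set (Source B's ancestors)
def ancLoop (d : PySem.Dict String (List String)) :
    List String → PySem.Set String → List String → Nat → List String
  | res, _, _, 0 => res
  | res, seen, frontier, Nat.succ fuel =>
    if frontier = [] then res else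
      let seen' := PySem.Set.update seen frontier
      let frontier' := (frontier.flatMap (fun v => (d.get? v).getD [])).filter
        (fun t => !(seen'.contains t))
      ancLoop d (res ++ frontier) seen' frontier' fuel

-- ancestors is only ever called with node a key of d
def ancestors (d : PySem.Dict String (List String)) (node : String) : List String :=
  ancLoop d [] PySem.Set.empty ((d.get? node).getD [])
    ((d.items.flatMap (fun p => p.2)).length + 1)

def find_dep_graph_alt (dependency_graph : List (String × List String)) : List (String × List String) :=
  let d : PySem.Dict String (List String) := ⟨dependency_graph⟩
  let keys := d.keys
  let children0 : PySem.Dict String (List String) :=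
    keys.foldl (fun c k => c.insert k []) PySem.Dict.empty
  let children := keys.foldl (fun c node =>
    (ancestors d node).foldl (fun c p =>
      if c.contains p then c.modify p [] (fun v => v ++ [node]) else c) c) children0
  (PySem.Dict.ofList (children.items.filter (fun p => !p.2.isEmpty))).items

-- ===== PRECONDITION & SPEC =====
-- Pre_ excludes association lists with duplicate keys: they do not represent a
-- Python dict (Python collapses them before either program runs).
def Pre_find_dep_graph (dependency_graph : List (String × List String)) : Prop :=
  (dependency_graph.map Prod.fst).Nodup
instance (dependency_graph : List (String × List String)) : Decidable (Pre_find_dep_graph dependency_graph) := by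
  unfold Pre_find_dep_graph; infer_instance

def pvWitness_find_dep_graph : (List (String × List String)) :=
  [("a", ["b"]), ("b", [])]

def Spec_find_dep_graph (dependency_graph : List (String × List String)) (out : List (String × List String)) : Prop := out = find_dep_graph_alt dependency_graph
instance (dependency_graph : List (String × List String)) (out : List (String × List String)) : Decidable (Spec_find_dep_graph dependency_graph out) := by unfold Spec_find_dep_graph; infer_instance

-- ===== CLAIM (what is proved, stated in full; the proofs are below) =====
def Claim_equal_find_dep_graph : Prop := ∀ (dependency_graph : List (String × List String)), Dom_find_dep_graph dependency_graph → Pre_find_dep_graph dependency_graph → Spec_find_dep_graph dependency_graph (find_dep_graph dependency_graph)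

-- ===== LEMMAS AND PROOFS =====

def pvG (d : PySem.Dict String (List String)) (v : String) : List String := (d.get? v).getD []
theorem pvTempEq (d : PySem.Dict String (List String)) (l : List String) (acc : List String) :
    l.foldl (fun t i =>
      match d.get? i with
      | some l => if l.isEmpty then t else t ++ l
      | none => t) acc = acc ++ l.flatMap (pvG d) := by
  induction l generalizing acc with
  | nil => simp
  | cons a l ih =>
    simp only [List.foldl_cons, List.flatMap_cons, ih]
    cases h : d.get? a with
    | none => simp [pvG, h]
    | some v =>
      cases v with
      | nil => simp [pvG, h]
      | cons b t => simp [pvG, h]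

theorem pvLockstep (d : PySem.Dict String (List String)) :
    ∀ (fuel : Nat) (res news : List String) (seen : PySem.Set String),
      (∀ e ∈ news, e ∉ res) →
      (∀ j ∈ res, ∀ t ∈ pvG d j, t ∈ res ∨ t ∈ news) →
      (∀ y, y ∈ seen ↔ y ∈ res) →
      findParentsLoop d res news fuel = ancLoop d res seen news fuel := by
  intro fuel
  induction fuel with
  | zero => intro res news seen _ _ _; rfl
  | succ fuel ih =>
    intro res news seen h1 h2 h3
    by_cases hn : news = []
    · simp [findParentsLoop, ancLoop, hn]
    · simp only [findParentsLoop, ancLoop, if_neg hn]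
      have hfilt : news.filter (fun i => !(res.contains i)) = news := by
        apply List.filter_eq_self.mpr
        intro a ha
        simpa using h1 a ha
      rw [hfilt, pvTempEq]
      have hmemres' : ∀ t, t ∈ res ++ news ↔ t ∈ PySem.Set.update seen news := by
        intro t
        rw [PySem.Set.mem_update, List.mem_append, h3]
      -- drop the old part of temp
      have hsplit : (([] ++ (res ++ news).flatMap (pvG d)).filter
            (fun k => !((res ++ news).contains k)))
          = (news.flatMap (pvG d)).filter (fun k => !((res ++ news).contains k)) := by
        rw [List.nil_append, List.flatMap_append, List.filter_append]
        have : (res.flatMap (pvG d)).filter (fun k => !((res ++ news).contains k)) = [] := by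
          apply List.filter_eq_nil_iff.mpr
          intro t ht
          obtain ⟨j, hj, htj⟩ := List.mem_flatMap.mp ht
          have hmem : t ∈ res ++ news := List.mem_append.mpr (h2 j hj t htj)
          simp [hmem]
        rw [this, List.nil_append]
      rw [hsplit]
      have hpred : (news.flatMap (pvG d)).filter (fun k => !((res ++ news).contains k))
          = (news.flatMap (fun v => (d.get? v).getD [])).filter
              (fun t => !((PySem.Set.update seen news).contains t)) := by
        apply List.filter_congr
        intro t _
        have : ((res ++ news).contains t) = ((PySem.Set.update seen news).contains t) := by
          apply Bool.coe_iff_coe.mp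
          rw [List.contains_iff_mem, PySem.Set.contains_eq_listContains, List.contains_iff_mem]
          exact hmemres' t
        rw [this]
      rw [hpred]
      apply ih
      · intro e he hmem
        have hpt := List.of_mem_filter he
        have hup : e ∈ seen.update news := (hmemres' e).mp hmem
        simp [PySem.Set.contains_eq_listContains, hup] at hpt
      · intro j hj t htj
        rcases List.mem_append.mp hj with hjr | hjn
        · left; exact List.mem_append.mpr (h2 j hjr t htj)
        · by_cases hin : t ∈ res ++ news
          · left; exact hin
          · right
            apply List.mem_filter.mpr
            refine ⟨List.mem_flatMap.mpr ⟨j, hjn, htj⟩, ?_⟩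
            have : ¬ t ∈ PySem.Set.update seen news := fun hh => hin ((hmemres' t).mpr hh)
            simp [PySem.Set.contains_eq_listContains, this]
      · intro y; exact (hmemres' y).symm

def pvStep (oc : PySem.Dict String (List String)) (p : String × String) : PySem.Dict String (List String) :=
  oc.modify p.1 [] (fun v => v ++ [p.2])

theorem pvContains_step (c : PySem.Dict String (List String)) (p : String × String)
    (h : c.contains p.1 = true) (q : String) : (pvStep c p).contains q = c.contains q := by
  rw [pvStep, PySem.Dict.contains_modify]
  by_cases hq : q = p.1
  · subst hq; simp [h]
  · simp [hq]

theorem pvContains_foldl (l : List (String × String)) :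
    ∀ (c : PySem.Dict String (List String)), (∀ p ∈ l, c.contains p.1 = true) →
      ∀ q, (l.foldl pvStep c).contains q = c.contains q := by
  induction l with
  | nil => intro c _ q; rfl
  | cons p l ih =>
    intro c hc q
    rw [List.foldl_cons]
    have h1 : c.contains p.1 = true := hc p (by simp)
    rw [ih (pvStep c p) (fun r hr => by rw [pvContains_step c p h1]; exact hc r (by simp [hr])) q]
    exact pvContains_step c p h1 q

theorem pvKeys_step (c : PySem.Dict String (List String)) (p : String × String)
    (h : c.contains p.1 = true) : (pvStep c p).keys = c.keys := by
  rw [pvStep, PySem.Dict.keys_modify, PySem.Dict.keys_insert_of_contains _ _ h]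

theorem pvKeys_foldl (l : List (String × String)) :
    ∀ (c : PySem.Dict String (List String)), (∀ p ∈ l, c.contains p.1 = true) →
      (l.foldl pvStep c).keys = c.keys := by
  induction l with
  | nil => intro c _; rfl
  | cons p l ih =>
    intro c hc
    rw [List.foldl_cons]
    have h1 : c.contains p.1 = true := hc p (by simp)
    rw [ih (pvStep c p) (fun r hr => by rw [pvContains_step c p h1]; exact hc r (by simp [hr]))]
    exact pvKeys_step c p h1

theorem pvAInner (x c : String) (ps : List String) :
    ∀ (oc : PySem.Dict String (List String)),
      ps.foldl (fun oc parent => if x == parent then oc.modify x [] (fun v => v ++ [c]) else oc) oc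
      = ((ps.filter (fun pa => x == pa)).map (fun _ => (x, c))).foldl pvStep oc := by
  induction ps with
  | nil => intro oc; rfl
  | cons pa ps ih =>
    intro oc
    by_cases h : x == pa
    · simp only [List.foldl_cons, List.filter_cons, h, if_pos, List.map_cons, List.foldl_cons]
      rw [ih]; rfl
    · simp only [List.foldl_cons, List.filter_cons, h]
      simp only [Bool.false_eq_true, if_false]
      rw [ih]

theorem pvBInner (node : String) (anc : List String) :
    ∀ (c : PySem.Dict String (List String)),
      anc.foldl (fun c p => if c.contains p then c.modify p [] (fun v => v ++ [node]) else c) c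
      = ((anc.filter (fun p => c.contains p)).map (fun p => (p, node))).foldl pvStep c := by
  induction anc with
  | nil => intro c; rfl
  | cons p anc ih =>
    intro c
    by_cases h : c.contains p
    · simp only [List.foldl_cons, List.filter_cons, h, if_pos, List.map_cons, List.foldl_cons]
      rw [ih, show (c.modify p [] fun v => v ++ [node]) = pvStep c (p, node) from rfl]
      have : anc.filter (fun q => (pvStep c (p, node)).contains q)
          = anc.filter (fun q => c.contains q) := by
        apply List.filter_congr
        intro q _
        exact pvContains_step c (p, node) h q
      rw [this]
    · simp only [List.foldl_cons, List.filter_cons, h]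
      simp only [Bool.false_eq_true, if_false]
      rw [ih]

theorem pvItems_eq (dd : PySem.Dict String (List String)) (h : dd.keys.Nodup) :
    dd.items = dd.keys.map (fun k => (k, dd.getD k [])) := by
  obtain ⟨ps⟩ := dd
  simp only [PySem.Dict.keys_mk, List.map_map]
  conv_lhs => rw [show ps = ps.map id from (List.map_id ps).symm]
  apply List.map_congr_left
  intro p hp
  have hmem : (p.1, p.2) ∈ (PySem.Dict.mk ps).items := by simpa using hp
  have := PySem.Dict.getD_of_mem_items _ hmem h ([])
  simp only [Function.comp_apply, id_eq]
  rw [this]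

theorem pvFlatMapSingle {β : Type} (ks : List String) (x : String) (f : String → List β) :
    ks.Nodup → x ∈ ks → (∀ x' ∈ ks, x' ≠ x → f x' = []) → ks.flatMap f = f x := by
  induction ks with
  | nil => intro _ hx; simp at hx
  | cons a ks ih =>
    intro hnd hx hf
    rcases List.mem_cons.mp hx with rfl | hx'
    · rw [List.flatMap_cons]
      have : ks.flatMap f = [] := by
        apply List.flatMap_eq_nil_iff.mpr
        intro x' hx'
        exact hf x' (by simp [hx']) (fun he => (List.nodup_cons.mp hnd).1 (he ▸ hx'))
      rw [this, List.append_nil]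
    · rw [List.flatMap_cons]
      have ha : f a = [] := hf a (by simp) (fun he => (List.nodup_cons.mp hnd).1 (he ▸ hx'))
      rw [ha, List.nil_append]
      exact ih (List.nodup_cons.mp hnd).2 hx' (fun x' h1 h2 => hf x' (by simp [h1]) h2)

theorem pvAOuter (OPitems : List (String × List String)) (ks : List String)
    (C0 : PySem.Dict String (List String)) :
    ks.foldl (fun oc x => OPitems.foldl (fun oc cp =>
        cp.2.foldl (fun oc parent => if x == parent then oc.modify x [] (fun v => v ++ [cp.1]) else oc) oc) oc) C0
    = (ks.flatMap (fun x => OPitems.flatMap (fun cp =>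
        (cp.2.filter (fun pa => x == pa)).map (fun _ => (x, cp.1))))).foldl pvStep C0 := by
  rw [List.foldl_flatMap]
  congr 1
  funext oc x
  rw [List.foldl_flatMap]
  congr 1
  funext oc2 cp
  exact pvAInner x cp.1 cp.2 oc2

theorem pvBOuter (A : String → List String) (ks : List String) :
    ∀ (c C0 : PySem.Dict String (List String)), (∀ q, c.contains q = C0.contains q) →
      ks.foldl (fun c node => (A node).foldl (fun c p =>
          if c.contains p then c.modify p [] (fun v => v ++ [node]) else c) c) c
      = (ks.flatMap (fun node => ((A node).filter (fun p => C0.contains p)).map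
          (fun p => (p, node)))).foldl pvStep c := by
  induction ks with
  | nil => intro c C0 _; rfl
  | cons node ks ih =>
    intro c C0 hc
    rw [List.foldl_cons, List.flatMap_cons, List.foldl_append, pvBInner]
    have hfilt : (A node).filter (fun p => c.contains p) = (A node).filter (fun p => C0.contains p) := by
      apply List.filter_congr; intro p _; exact hc p
    rw [hfilt]
    apply ih
    intro q
    rw [pvContains_foldl _ _ ?h q]
    · exact hc q
    case h =>
      intro p hp
      obtain ⟨p', hp', rfl⟩ := List.mem_map.mp hp
      rw [hc]
      exact List.of_mem_filter hp'

theorem pvFindParentsEq (d : PySem.Dict String (List String)) (x : String) :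
    find_parents x d = ancLoop d [] PySem.Set.empty ((d.get? x).getD [])
      ((d.items.flatMap (fun p => p.2)).length + 1) := by
  apply pvLockstep
  · intro e he hmem; simp at hmem
  · intro j hj; simp at hj
  · intro y; constructor
    · intro hy; simp [PySem.Set.empty] at hy
    · intro hy; simp at hy


-- the per-key value lists agree
theorem pvValEq (d : PySem.Dict String (List String)) (ks : List String)
    (hnd : ks.Nodup)
    (C0 : PySem.Dict String (List String)) (hC0keys : C0.keys = ks)
    (x : String) (hx : x ∈ ks) :
    (((ks.flatMap (fun x' => (ks.map (fun i => (i, find_parents i d))).flatMap (fun cp =>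
        (cp.2.filter (fun pa => x' == pa)).map (fun _ => (x', cp.1))))).filter
        (fun p => p.1 == x)).map (fun p => p.2))
    = (((ks.flatMap (fun node => ((ancestors d node).filter (fun p => C0.contains p)).map
        (fun p => (p, node)))).filter (fun p => p.1 == x)).map (fun p => p.2)) := by
  have hcx : C0.contains x = true := by
    rw [PySem.Dict.contains_iff_mem_keys, hC0keys]; exact hx
  rw [List.filter_flatMap, List.filter_flatMap]
  rw [pvFlatMapSingle ks x _ hnd hx ?hzero]
  case hzero =>
    intro x' _ hne
    apply List.filter_eq_nil_iff.mpr
    intro q hq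
    obtain ⟨cp, _, hq2⟩ := List.mem_flatMap.mp hq
    obtain ⟨_, _, rfl⟩ := List.mem_map.mp hq2
    simp [hne]
  have hself : ((ks.map (fun i => (i, find_parents i d))).flatMap (fun cp =>
      (cp.2.filter (fun pa => x == pa)).map (fun _ => (x, cp.1)))).filter (fun p => p.1 == x)
      = (ks.map (fun i => (i, find_parents i d))).flatMap (fun cp =>
      (cp.2.filter (fun pa => x == pa)).map (fun _ => (x, cp.1))) := by
    apply List.filter_eq_self.mpr
    intro q hq
    obtain ⟨cp, _, hq2⟩ := List.mem_flatMap.mp hq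
    obtain ⟨_, _, rfl⟩ := List.mem_map.mp hq2
    simp
  rw [hself, List.flatMap_map, List.map_flatMap, List.map_flatMap]
  simp only [List.filter_map, List.map_map]
  congr 1
  funext i
  have hfp : find_parents i d = ancestors d i := pvFindParentsEq d i
  rw [hfp, List.filter_filter]
  simp only [Function.comp_def]
  congr 1
  apply List.filter_congr
  intro a _
  by_cases h : a = x
  · subst h; simp [hcx]
  · have hxa : x ≠ a := fun he => h he.symm
    exact Bool.coe_iff_coe.mp (by simp [hxa, h])

-- A's dict of children equals B's, before the final nonempty filter
theorem pvCEq (dg : List (String × List String)) (hpre : (dg.map Prod.fst).Nodup) :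
    (let d : PySem.Dict String (List String) := ⟨dg⟩
     let keys := d.keys
     let output_parents := keys.foldl (fun op i => op.insert i (find_parents i d)) PySem.Dict.empty
     let output_children : PySem.Dict String (List String) :=
       keys.foldl (fun oc k => oc.insert k []) PySem.Dict.empty
     keys.foldl (fun oc x =>
       output_parents.items.foldl (fun oc cp =>
         cp.2.foldl (fun oc parent =>
           if x == parent then oc.modify x [] (fun v => v ++ [cp.1]) else oc) oc) oc) output_children)
    = (let d : PySem.Dict String (List String) := ⟨dg⟩
       let keys := d.keys
       let children0 : PySem.Dict String (List String) :=
         keys.foldl (fun c k => c.insert k []) PySem.Dict.empty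
       keys.foldl (fun c node =>
         (ancestors d node).foldl (fun c p =>
           if c.contains p then c.modify p [] (fun v => v ++ [node]) else c) c) children0) := by
  dsimp only
  have hnd : (PySem.Dict.mk dg).keys.Nodup := by
    simpa [PySem.Dict.keys_mk] using hpre
  have hOP : ((PySem.Dict.mk dg).keys.foldl
      (fun op i => op.insert i (find_parents i (PySem.Dict.mk dg))) PySem.Dict.empty).items
      = (PySem.Dict.mk dg).keys.map (fun i => (i, find_parents i (PySem.Dict.mk dg))) := by
    have h := PySem.Dict.items_foldl_insert_fresh (PySem.Dict.mk dg).keys (fun i => i)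
      (fun i => find_parents i (PySem.Dict.mk dg)) PySem.Dict.empty
      (by intro a _; exact PySem.Dict.contains_empty a) (by simpa using hnd)
    simpa using h
  have hC0items : ((PySem.Dict.mk dg).keys.foldl
      (fun c k => c.insert k ([] : List String)) PySem.Dict.empty).items
      = (PySem.Dict.mk dg).keys.map (fun k => (k, ([] : List String))) := by
    have h := PySem.Dict.items_foldl_insert_fresh (PySem.Dict.mk dg).keys (fun i => i)
      (fun _ => ([] : List String)) PySem.Dict.empty
      (by intro a _; exact PySem.Dict.contains_empty a) (by simpa using hnd)
    simpa using h
  have hC0keys : ((PySem.Dict.mk dg).keys.foldl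
      (fun c k => c.insert k ([] : List String)) PySem.Dict.empty).keys
      = (PySem.Dict.mk dg).keys := by
    show (((PySem.Dict.mk dg).keys.foldl
      (fun c k => c.insert k ([] : List String)) PySem.Dict.empty).items.map (fun p => p.1))
      = (PySem.Dict.mk dg).keys
    rw [hC0items, List.map_map]
    simp
  have hC0getD : ∀ y, (((PySem.Dict.mk dg).keys.foldl
      (fun c k => c.insert k ([] : List String)) PySem.Dict.empty)).getD y [] = [] := by
    intro y
    by_cases hy : y ∈ (PySem.Dict.mk dg).keys
    · refine PySem.Dict.getD_of_mem_items _ ?_ ?_ []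
      · rw [hC0items]; exact List.mem_map.mpr ⟨y, hy, rfl⟩
      · rw [hC0keys]; exact hnd
    · refine PySem.Dict.getD_of_not_contains _ _ ?_
      apply eq_false_of_ne_true
      rw [PySem.Dict.contains_iff_mem_keys, hC0keys]
      exact hy
  rw [pvAOuter, pvBOuter _ _ _ _ (fun q => rfl), hOP]
  apply PySem.Dict.ext
  have hfA : ∀ p ∈ (PySem.Dict.mk dg).keys.flatMap (fun x =>
      ((PySem.Dict.mk dg).keys.map (fun i => (i, find_parents i (PySem.Dict.mk dg)))).flatMap (fun cp =>
        (cp.2.filter (fun pa => x == pa)).map (fun _ => (x, cp.1)))), (((PySem.Dict.mk dg).keys.foldl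
      (fun c k => c.insert k ([] : List String)) PySem.Dict.empty)).contains p.1 = true := by
    intro p hp
    obtain ⟨x', hx', hp2⟩ := List.mem_flatMap.mp hp
    obtain ⟨cp, _, hp3⟩ := List.mem_flatMap.mp hp2
    obtain ⟨_, _, rfl⟩ := List.mem_map.mp hp3
    rw [PySem.Dict.contains_iff_mem_keys, hC0keys]
    exact hx'
  have hfB : ∀ p ∈ (PySem.Dict.mk dg).keys.flatMap (fun node =>
      ((ancestors (PySem.Dict.mk dg) node).filter (fun q => (((PySem.Dict.mk dg).keys.foldl
        (fun c k => c.insert k ([] : List String)) PySem.Dict.empty)).contains q)).map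
        (fun q => (q, node))), (((PySem.Dict.mk dg).keys.foldl
      (fun c k => c.insert k ([] : List String)) PySem.Dict.empty)).contains p.1 = true := by
    intro p hp
    obtain ⟨node, _, hp2⟩ := List.mem_flatMap.mp hp
    obtain ⟨q, hq, rfl⟩ := List.mem_map.mp hp2
    exact List.of_mem_filter hq
  rw [pvItems_eq _ (by rw [pvKeys_foldl _ _ hfA, hC0keys]; exact hnd),
      pvItems_eq _ (by rw [pvKeys_foldl _ _ hfB, hC0keys]; exact hnd),
      pvKeys_foldl _ _ hfA, pvKeys_foldl _ _ hfB, hC0keys]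
  apply List.map_congr_left
  intro x hx
  have eA := PySem.Dict.getD_foldl_modify_append
    ((PySem.Dict.mk dg).keys.flatMap (fun x =>
      ((PySem.Dict.mk dg).keys.map (fun i => (i, find_parents i (PySem.Dict.mk dg)))).flatMap (fun cp =>
        (cp.2.filter (fun pa => x == pa)).map (fun _ => (x, cp.1)))))
    (((PySem.Dict.mk dg).keys.foldl (fun c k => c.insert k ([] : List String)) PySem.Dict.empty)) x
  have eB := PySem.Dict.getD_foldl_modify_append
    ((PySem.Dict.mk dg).keys.flatMap (fun node =>
      ((ancestors (PySem.Dict.mk dg) node).filter (fun q => (((PySem.Dict.mk dg).keys.foldl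
        (fun c k => c.insert k ([] : List String)) PySem.Dict.empty)).contains q)).map
        (fun q => (q, node))))
    (((PySem.Dict.mk dg).keys.foldl (fun c k => c.insert k ([] : List String)) PySem.Dict.empty)) x
  refine Prod.ext rfl ?_
  show (List.foldl pvStep _ _).getD x [] = (List.foldl pvStep _ _).getD x []
  rw [show (pvStep = fun (d : PySem.Dict String (List String)) (p : String × String) =>
        d.modify p.1 [] fun v => v ++ [p.2]) from rfl]
  rw [eA, eB, hC0getD]
  exact pvValEq (PySem.Dict.mk dg) (PySem.Dict.mk dg).keys hnd _ hC0keys x hx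


-- ===== VERDICT (by name: the statement is the Claim_ definition above) =====
theorem find_dep_graph_spec : Claim_equal_find_dep_graph := by
  intro dg _ hpre
  unfold Spec_find_dep_graph
  show find_dep_graph dg = find_dep_graph_alt dg
  have h := pvCEq dg hpre
  simp only [find_dep_graph, find_dep_graph_alt]
  dsimp only at h ⊢
  rw [h]
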